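-- pv_equiv track=rewrite | github.com/pypi-data/pypi-mirror-24 | packages/jenkins_trackerscraper/jenkins_trackerscraper-1.0.0.tar.gz/jenkins_trackerscraper-1.0.0/PivotalTrackerScraper/utils.py | parseTests
-- ===== SOURCE A (Python) =====
-- def parseTests (test_list):
--     tests = {'Yes': 0, 'No': 0, 'Total': 0}
--     for i in range (0 , len(test_list)):
--         if ('Yes') in test_list[i]:
--             tests ['Yes'] = tests ['Yes'] + 1
--         else:
--             tests ['No'] = tests ['No'] + 1
--         tests ['Total'] = tests ['Total'] + 1
--     return tests
-- ===== SOURCE B (Python) =====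
-- def parseTests(test_list):
--     yes_items = [t for t in test_list if 'Yes' in t]
--     no_items = [t for t in test_list if 'Yes' not in t]
--     return {'Yes': len(yes_items),
--             'No': len(no_items),
--             'Total': len(yes_items) + len(no_items)}
-- ===== Notes on version B (the rewrite author's own statement) =====
-- stated objective: alternative
-- what changed: Instead of one index loop mutating three dict counters, B partitions the list into the 'Yes'-matching and non-matching sublists in two staged filter passes and reads all three numbers off their lengths, building the dict once at the end.
import Mathlib
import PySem

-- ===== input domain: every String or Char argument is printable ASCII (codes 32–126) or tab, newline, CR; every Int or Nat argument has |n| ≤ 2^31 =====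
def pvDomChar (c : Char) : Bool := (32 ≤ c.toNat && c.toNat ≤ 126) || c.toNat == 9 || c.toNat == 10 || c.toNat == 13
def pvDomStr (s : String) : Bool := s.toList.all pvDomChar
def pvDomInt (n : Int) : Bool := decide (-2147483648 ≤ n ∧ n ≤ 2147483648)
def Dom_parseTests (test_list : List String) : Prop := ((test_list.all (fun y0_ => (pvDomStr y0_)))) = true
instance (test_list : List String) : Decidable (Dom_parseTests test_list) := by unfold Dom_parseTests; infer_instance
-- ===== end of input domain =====

-- B replaces A's index loop mutating three dict counters by a two-pass partition into the matching
-- and non-matching sublists, reading Yes/No/Total off their lengths (alternative decomposition, same cost).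

-- ===== PORT A =====
-- A's loop body: the if/else bumping 'Yes'/'No', then the 'Total' bump
def parseTestsBody (d : PySem.Dict String Int) (s : String) : PySem.Dict String Int :=
  let d := if PySem.Str.isIn "Yes" s then d.insert "Yes" (d.getD "Yes" 0 + 1)
           else d.insert "No" (d.getD "No" 0 + 1)
  d.insert "Total" (d.getD "Total" 0 + 1)

def parseTests (test_list : List String) : List (String × Int) :=
  let tests : PySem.Dict String Int :=
    ((PySem.Dict.empty.insert "Yes" 0).insert "No" 0).insert "Total" 0
  let tests := (PySem.List.pyRange 0 (PySem.List.len test_list) 1).foldl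
    (fun d i => parseTestsBody d (PySem.List.pyGetD test_list i ""))  -- i always in range in A's loop
    tests
  tests.items

-- ===== PORT B =====
def parseTests_alt (test_list : List String) : List (String × Int) :=
  let yes_items := test_list.filter (fun t => PySem.Str.isIn "Yes" t)
  let no_items := test_list.filter (fun t => ! PySem.Str.isIn "Yes" t)
  [("Yes", (yes_items.length : Int)),
   ("No", (no_items.length : Int)),
   ("Total", (yes_items.length : Int) + (no_items.length : Int))]

-- ===== PRECONDITION & SPEC =====
def Spec_parseTests (test_list : List String) (out : List (String × Int)) : Prop := out = parseTests_alt test_list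
instance (test_list : List String) (out : List (String × Int)) : Decidable (Spec_parseTests test_list out) := by unfold Spec_parseTests; infer_instance

-- ===== CLAIM (what is proved, stated in full; the proofs are below) =====
def Claim_equal_parseTests : Prop := ∀ (test_list : List String), Dom_parseTests test_list → Spec_parseTests test_list (parseTests test_list)

-- ===== LEMMAS AND PROOFS =====

-- one iteration of A's loop body on the three-key dict
theorem parseTestsBody_mk (y n t : Int) (a : String) :
    parseTestsBody (PySem.Dict.mk [("Yes", y), ("No", n), ("Total", t)]) a
      = if PySem.Str.isIn "Yes" a then PySem.Dict.mk [("Yes", y + 1), ("No", n), ("Total", t + 1)]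
        else PySem.Dict.mk [("Yes", y), ("No", n + 1), ("Total", t + 1)] := by
  by_cases h : PySem.Chars.isIn ['Y', 'e', 's'] a.toList = true <;>
    simp [parseTestsBody, PySem.Str.isIn, h,
      PySem.Dict.insert, PySem.Dict.getD, PySem.Dict.get?, PySem.Dict.contains]

-- the loop invariant: folding A's body over the list adds the lengths of the two filtered sublists
theorem parseTests_loop_items (xs : List String) (y n t : Int) :
    (xs.foldl parseTestsBody (PySem.Dict.mk [("Yes", y), ("No", n), ("Total", t)])).items
    = [("Yes", y + ((xs.filter (fun s => PySem.Str.isIn "Yes" s)).length : Int)),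
       ("No", n + ((xs.filter (fun s => ! PySem.Str.isIn "Yes" s)).length : Int)),
       ("Total", t + ((xs.filter (fun s => PySem.Str.isIn "Yes" s)).length : Int)
                    + ((xs.filter (fun s => ! PySem.Str.isIn "Yes" s)).length : Int))] := by
  induction xs generalizing y n t with
  | nil => simp
  | cons a xs ih =>
    rw [List.foldl_cons, parseTestsBody_mk]
    by_cases h : PySem.Str.isIn "Yes" a = true
    · have hc : PySem.Chars.isIn ['Y', 'e', 's'] a.toList = true := by
        simpa [PySem.Str.isIn] using h
      rw [if_pos h, ih]
      simp [List.filter, PySem.Str.isIn, hc]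
      omega
    · have hc : ¬ PySem.Chars.isIn ['Y', 'e', 's'] a.toList = true := by
        simpa [PySem.Str.isIn] using h
      rw [if_neg h, ih]
      simp [List.filter, PySem.Str.isIn, hc]
      omega

-- ===== VERDICT (by name: the statement is the Claim_ definition above) =====
theorem parseTests_spec : Claim_equal_parseTests := by
  intro xs _
  show parseTests xs = parseTests_alt xs
  show ((PySem.List.pyRange 0 (PySem.List.len xs) 1).foldl
      (fun d i => parseTestsBody d (PySem.List.pyGetD xs i ""))
      (((PySem.Dict.empty.insert "Yes" 0).insert "No" 0).insert "Total" 0)).items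
    = parseTests_alt xs
  rw [show (((PySem.Dict.empty.insert "Yes" (0:Int)).insert "No" 0).insert "Total" 0)
        = PySem.Dict.mk [("Yes", 0), ("No", 0), ("Total", 0)] from rfl]
  rw [PySem.List.foldl_pyRange_zero_pyGetD xs "" parseTestsBody
        (PySem.Dict.mk [("Yes", 0), ("No", 0), ("Total", 0)])]
  rw [parseTests_loop_items]
  simp [parseTests_alt]
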